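-- pv_equiv track=rewrite | github.com/ingmaurorusso/AoC2024 | 21_Dec_2024/Day21_solution.py | buildSeqFromTo
-- ===== SOURCE A (Python) =====
-- def buildSeqFromTo(pBegin, pEnd, xFirst, pAvoid):
--     bad = (pEnd == pAvoid)
--     for k in range(2):
--         seq = ''
--
--         pMove = pBegin.copy()
--         for i in range(2):
--             isX = (i == 0) == xFirst
--
--             c = 0 if isX else 1
--
--             while pMove[c] < pEnd[c]:
--                 if pMove == pAvoid:
--                     bad = True
--                 pMove[c] += 1
--                 seq += '>' if isX else '^'
--
--             while pMove[c] > pEnd[c]: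
--                 if pMove == pAvoid:
--                     bad = True
--                 pMove[c] -= 1
--                 seq += '<' if isX else 'v'
--
--         if not bad:
--             break
--
--         xFirst = not xFirst
--
--     return seq
-- ===== SOURCE B (Python) =====
-- def buildSeqFromTo(pBegin, pEnd, xFirst, pAvoid):
--     x0, y0 = pBegin[0], pBegin[1]
--     x1, y1 = pEnd[0], pEnd[1]
--     ax, ay = pAvoid[0], pAvoid[1]
--     xs = '>' * (x1 - x0) if x1 >= x0 else '<' * (x0 - x1)
--     ys = '^' * (y1 - y0) if y1 >= y0 else 'v' * (y0 - y1)
--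
--     def on_path(x_first):
--         # inclusive L-shaped path: the first axis fully, then the other
--         if x_first:
--             return (ay == y0 and min(x0, x1) <= ax <= max(x0, x1)) or \
--                    (ax == x1 and min(y0, y1) <= ay <= max(y0, y1))
--         return (ax == x0 and min(y0, y1) <= ay <= max(y0, y1)) or \
--                (ay == y1 and min(x0, x1) <= ax <= max(x0, x1))
--
--     if on_path(xFirst):
--         xFirst = not xFirst
--     return xs + ys if xFirst else ys + xs
-- ===== Notes on version B (the rewrite author's own statement) =====
-- stated objective: faster
-- what changed: A walks the grid one unit step at a time (appending one character and comparing the full position list against pAvoid at every step, re-walking with the other axis order if the first hits the obstacle); B builds the two run-length strings in closed form and decides avoidance with a constant-time inclusive-segment-membership test on the L-path.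
-- intended difference: On inputs where the avoid point's first two coordinates lie on the turning L-path of the requested axis order but pAvoid never matches a path position as a whole list (pAvoid != pEnd and a different length or different elements past the first two coordinates), A's whole-list obstacle comparison never fires and A returns the path through the avoided cell, while B, reading pAvoid as a 2-D point, flips the axis order to avoid it, which is the intended behaviour. — e.g. on buildSeqFromTo([0, 0], [1, 1], true, [0, 0, 7]): A returns ">^", B returns "^>"
-- outside the precondition, e.g. on buildSeqFromTo([0, 0], [1, 1], True, [0]): A returns '>^', B raises IndexError
import Mathlib
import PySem

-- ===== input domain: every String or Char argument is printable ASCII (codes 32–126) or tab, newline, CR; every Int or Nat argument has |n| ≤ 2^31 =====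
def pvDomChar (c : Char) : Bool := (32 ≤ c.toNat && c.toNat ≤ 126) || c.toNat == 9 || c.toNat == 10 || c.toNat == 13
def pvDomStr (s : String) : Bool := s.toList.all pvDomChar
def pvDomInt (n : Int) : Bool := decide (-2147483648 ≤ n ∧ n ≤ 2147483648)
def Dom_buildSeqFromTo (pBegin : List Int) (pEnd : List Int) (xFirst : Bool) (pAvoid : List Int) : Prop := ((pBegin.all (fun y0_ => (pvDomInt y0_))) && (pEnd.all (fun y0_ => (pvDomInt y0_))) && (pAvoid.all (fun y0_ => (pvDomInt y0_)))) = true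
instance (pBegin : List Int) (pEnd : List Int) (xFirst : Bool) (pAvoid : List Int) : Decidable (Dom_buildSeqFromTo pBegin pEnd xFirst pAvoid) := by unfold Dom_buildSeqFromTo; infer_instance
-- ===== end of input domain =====

-- B replaces A's unit-step walk (with a per-step obstacle comparison) by closed-form string
-- repetition plus a constant-time segment-membership test; neither version mutates its arguments.

-- ===== PORT A =====
-- the `while pMove[c] < pEnd[c]` loop; fuel = the exact number of iterations of that loop,
-- so this is the same step-for-step walk.  Indices 0/1 are in range under Pre_ (getD exact there).
def pvA_up (fuel : Nat) (pMove pAvoid : List Int) (endc : Int) (c : Nat) (ch : Char)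
    (seq : String) (bad : Bool) : List Int × String × Bool :=
  match fuel with
  | 0 => (pMove, seq, bad)
  | f+1 =>
    if pMove.getD c 0 < endc then
      pvA_up f (pMove.set c (pMove.getD c 0 + 1)) pAvoid endc c ch (seq.push ch)
        (if pMove == pAvoid then true else bad)
    else (pMove, seq, bad)

-- the `while pMove[c] > pEnd[c]` loop
def pvA_down (fuel : Nat) (pMove pAvoid : List Int) (endc : Int) (c : Nat) (ch : Char)
    (seq : String) (bad : Bool) : List Int × String × Bool :=
  match fuel with
  | 0 => (pMove, seq, bad)
  | f+1 =>
    if endc < pMove.getD c 0 then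
      pvA_down f (pMove.set c (pMove.getD c 0 - 1)) pAvoid endc c ch (seq.push ch)
        (if pMove == pAvoid then true else bad)
    else (pMove, seq, bad)

-- body of `for i in range(2)`
def pvA_axis (pEnd pAvoid : List Int) (xFirst : Bool) (st : List Int × String × Bool)
    (i : Nat) : List Int × String × Bool :=
  let isX := ((i == 0) == xFirst)
  let c := if isX then 0 else 1
  let e := pEnd.getD c 0
  let r1 := pvA_up ((e - st.1.getD c 0).toNat) st.1 pAvoid e c (if isX then '>' else '^') st.2.1 st.2.2
  pvA_down ((r1.1.getD c 0 - e).toNat) r1.1 pAvoid e c (if isX then '<' else 'v') r1.2.1 r1.2.2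

-- one iteration of `for k in range(2)`: seq = '', pMove = pBegin.copy(); returns (seq, bad)
def pvA_pass (pBegin pEnd pAvoid : List Int) (xFirst : Bool) (bad0 : Bool) : String × Bool :=
  let r := (List.range 2).foldl (pvA_axis pEnd pAvoid xFirst) (pBegin, "", bad0)
  (r.2.1, r.2.2)

def buildSeqFromTo (pBegin : List Int) (pEnd : List Int) (xFirst : Bool) (pAvoid : List Int) : String :=
  let bad := pEnd == pAvoid
  let r := pvA_pass pBegin pEnd pAvoid xFirst bad
  if !r.2 then r.1 else (pvA_pass pBegin pEnd pAvoid (!xFirst) r.2).1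

-- ===== PORT B =====
-- Source B's `on_path(x_first)`: does the inclusive L-path (first axis fully, then the other) meet the avoid point?
def pvB_onPath (x0 y0 x1 y1 ax ay : Int) (xf : Bool) : Bool :=
  if xf then
    decide ((ay = y0 ∧ min x0 x1 ≤ ax ∧ ax ≤ max x0 x1) ∨
            (ax = x1 ∧ min y0 y1 ≤ ay ∧ ay ≤ max y0 y1))
  else
    decide ((ax = x0 ∧ min y0 y1 ≤ ay ∧ ay ≤ max y0 y1) ∨
            (ay = y1 ∧ min x0 x1 ≤ ax ∧ ax ≤ max x0 x1))

-- indices 0/1 are in range under Pre_, where getD is exact for Python's pBegin[0] etc.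
def buildSeqFromTo_alt (pBegin : List Int) (pEnd : List Int) (xFirst : Bool) (pAvoid : List Int) : String :=
  let x0 := pBegin.getD 0 0
  let y0 := pBegin.getD 1 0
  let x1 := pEnd.getD 0 0
  let y1 := pEnd.getD 1 0
  let ax := pAvoid.getD 0 0
  let ay := pAvoid.getD 1 0
  let xs : String := if x0 ≤ x1 then String.ofList (List.replicate (x1 - x0).toNat '>') else String.ofList (List.replicate (x0 - x1).toNat '<')
  let ys : String := if y0 ≤ y1 then String.ofList (List.replicate (y1 - y0).toNat '^') else String.ofList (List.replicate (y0 - y1).toNat 'v')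
  let xf := if pvB_onPath x0 y0 x1 y1 ax ay xFirst then !xFirst else xFirst
  if xf then xs ++ ys else ys ++ xs

-- ===== PRECONDITION & SPEC =====
-- closed-form helpers for D_ below (boundary relations on the input's coordinates):
-- v within the closed interval spanned by x and y
def pvSeg (x y v : Int) : Prop := min x y ≤ v ∧ v ≤ max x y

-- both axes move, and (a0,a1) lies on the inclusive L-path for the requested axis order
def pvD (b0 b1 e0 e1 a0 a1 : Int) (xf : Bool) : Prop :=
  (xf = true ∧ (a1 = b1 ∧ pvSeg b0 e0 a0 ∨ a0 = e0 ∧ pvSeg b1 e1 a1) ∨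
   xf = false ∧ (a0 = b0 ∧ pvSeg b1 e1 a1 ∨ a1 = e1 ∧ pvSeg b0 e0 a0)) ∧
  b0 ≠ e0 ∧ b1 ≠ e1

-- Pre_ excludes only pAvoid lists shorter than 2 (there A returns but B raises IndexError
-- reading the avoid point's two coordinates) besides the inputs where A itself raises
-- (pBegin or pEnd shorter than 2).
def Pre_buildSeqFromTo (pBegin : List Int) (pEnd : List Int) (xFirst : Bool) (pAvoid : List Int) : Prop :=
  2 ≤ pBegin.length ∧ 2 ≤ pEnd.length ∧ 2 ≤ pAvoid.length
instance (pBegin : List Int) (pEnd : List Int) (xFirst : Bool) (pAvoid : List Int) : Decidable (Pre_buildSeqFromTo pBegin pEnd xFirst pAvoid) := by unfold Pre_buildSeqFromTo; infer_instance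
def pvWitness_buildSeqFromTo : List Int × List Int × Bool × List Int := ([0, 0], [1, 2], true, [1, 0])

-- On inputs where the avoid point's first two coordinates lie on the turning L-path of the
-- requested axis order but pAvoid never matches a path position as a whole list (pAvoid ≠ pEnd
-- and a different length or different elements past the first two coordinates), A's whole-list
-- obstacle comparison never fires and A returns the path through the avoided cell, while B,
-- reading pAvoid as a 2-D point, flips the axis order to avoid it — the intended behaviour.
def D_buildSeqFromTo (pBegin : List Int) (pEnd : List Int) (xFirst : Bool) (pAvoid : List Int) : Prop :=
  pvD (pBegin.getD 0 0) (pBegin.getD 1 0) (pEnd.getD 0 0) (pEnd.getD 1 0) (pAvoid.getD 0 0) (pAvoid.getD 1 0) xFirst ∧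
  pEnd ≠ pAvoid ∧ (pAvoid.drop 2 ≠ pBegin.drop 2 ∨ pAvoid.take 2 = pEnd.take 2)
instance (pBegin : List Int) (pEnd : List Int) (xFirst : Bool) (pAvoid : List Int) : Decidable (D_buildSeqFromTo pBegin pEnd xFirst pAvoid) := by unfold D_buildSeqFromTo pvD pvSeg; infer_instance

def Spec_buildSeqFromTo (pBegin : List Int) (pEnd : List Int) (xFirst : Bool) (pAvoid : List Int) (out : String) : Prop := ¬ D_buildSeqFromTo pBegin pEnd xFirst pAvoid → out = buildSeqFromTo_alt pBegin pEnd xFirst pAvoid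
instance (pBegin : List Int) (pEnd : List Int) (xFirst : Bool) (pAvoid : List Int) (out : String) : Decidable (Spec_buildSeqFromTo pBegin pEnd xFirst pAvoid out) := by unfold Spec_buildSeqFromTo; infer_instance

def pvDiffWitness_buildSeqFromTo : List Int × List Int × Bool × List Int := ([0, 0], [1, 1], true, [0, 0, 7])
def pvDiffWitnessOut_buildSeqFromTo : String × String := (">^", "^>")

-- ===== CLAIM (what is proved, stated in full; the proofs are below) =====
def Claim_unchanged_buildSeqFromTo : Prop := ∀ (pBegin : List Int) (pEnd : List Int) (xFirst : Bool) (pAvoid : List Int), Dom_buildSeqFromTo pBegin pEnd xFirst pAvoid → Pre_buildSeqFromTo pBegin pEnd xFirst pAvoid → Spec_buildSeqFromTo pBegin pEnd xFirst pAvoid (buildSeqFromTo pBegin pEnd xFirst pAvoid)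
def Claim_changed_buildSeqFromTo : Prop := Dom_buildSeqFromTo (pvDiffWitness_buildSeqFromTo.1) (pvDiffWitness_buildSeqFromTo.2.1) (pvDiffWitness_buildSeqFromTo.2.2.1) (pvDiffWitness_buildSeqFromTo.2.2.2) ∧ Pre_buildSeqFromTo (pvDiffWitness_buildSeqFromTo.1) (pvDiffWitness_buildSeqFromTo.2.1) (pvDiffWitness_buildSeqFromTo.2.2.1) (pvDiffWitness_buildSeqFromTo.2.2.2) ∧ D_buildSeqFromTo (pvDiffWitness_buildSeqFromTo.1) (pvDiffWitness_buildSeqFromTo.2.1) (pvDiffWitness_buildSeqFromTo.2.2.1) (pvDiffWitness_buildSeqFromTo.2.2.2) ∧ buildSeqFromTo (pvDiffWitness_buildSeqFromTo.1) (pvDiffWitness_buildSeqFromTo.2.1) (pvDiffWitness_buildSeqFromTo.2.2.1) (pvDiffWitness_buildSeqFromTo.2.2.2) = pvDiffWitnessOut_buildSeqFromTo.1 ∧ buildSeqFromTo_alt (pvDiffWitness_buildSeqFromTo.1) (pvDiffWitness_buildSeqFromTo.2.1) (pvDiffWitness_buildSeqFromTo.2.2.1) (pvDiffWitness_buildSeqFromTo.2.2.2)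 = pvDiffWitnessOut_buildSeqFromTo.2 ∧ pvDiffWitnessOut_buildSeqFromTo.1 ≠ pvDiffWitnessOut_buildSeqFromTo.2
def Claim_exact_buildSeqFromTo : Prop := ∀ (pBegin : List Int) (pEnd : List Int) (xFirst : Bool) (pAvoid : List Int), Dom_buildSeqFromTo pBegin pEnd xFirst pAvoid → Pre_buildSeqFromTo pBegin pEnd xFirst pAvoid → D_buildSeqFromTo pBegin pEnd xFirst pAvoid → buildSeqFromTo pBegin pEnd xFirst pAvoid ≠ buildSeqFromTo_alt pBegin pEnd xFirst pAvoid

-- ===== LEMMAS AND PROOFS =====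

-- (u,v) on the inclusive L-path from (p,q) to (r,s), first coordinate swept first
def pvOnPath (p q r s u v : Int) : Prop :=
  (v = q ∧ min p r ≤ u ∧ u ≤ max p r) ∨ (u = r ∧ min q s ≤ v ∧ v ≤ max q s)

-- v between m (inclusive) and e (exclusive): exactly the points A's sweep compares with pAvoid
def pvBtw (m e v : Int) : Prop := (m ≤ v ∧ v < e) ∨ (e < v ∧ v ≤ m)

-- the L-path hit with the final point removed (the positions A's walk compares), per axis order
def pvExclT (b0 b1 e0 e1 a0 a1 : Int) : Prop :=
  (pvBtw b0 e0 a0 ∧ b1 = a1) ∨ (e0 = a0 ∧ pvBtw b1 e1 a1)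
def pvExclF (b0 b1 e0 e1 a0 a1 : Int) : Prop :=
  (b0 = a0 ∧ pvBtw b1 e1 a1) ∨ (pvBtw b0 e0 a0 ∧ e1 = a1)


-- v between m (inclusive) and e (exclusive): exactly the points A's sweep compares with pAvoid
def pvSegStr (m e : Int) (up dn : Char) : List Char :=
  if 0 ≤ e - m then List.replicate (e - m).toNat up else List.replicate (-(e - m)).toNat dn

-- did one axis sweep (up then down) flag pAvoid?
def pvHitAx (m e : Int) (f : Int → List Int) (pAvoid : List Int) : Bool :=
  decide (∃ j : Nat, j < (e - m).toNat ∧ f (m + (j : Int)) = pAvoid) ||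
  decide (∃ j : Nat, j < (m - e).toNat ∧ f (m - (j : Int)) = pAvoid)

theorem pv_getD_set_self (l : List Int) (c : Nat) (v : Int) (h : c < l.length) :
    (l.set c v).getD c 0 = v := by
  rw [List.getD_eq_getElem?_getD, List.getElem?_set_self (by simpa using h)]
  rfl

theorem pv_set_self (l : List Int) (c : Nat) (h : c < l.length) :
    l.set c (l.getD c 0) = l := by
  rw [List.getD_eq_getElem?_getD, List.getElem?_eq_getElem h]
  exact List.set_getElem_self h

theorem pvA_up_spec (n : Nat) : ∀ (pMove pAvoid : List Int) (c : Nat) (ch : Char)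
    (seq : String) (bad : Bool), c < pMove.length →
    pvA_up n pMove pAvoid (pMove.getD c 0 + n) c ch seq bad =
      (pMove.set c (pMove.getD c 0 + n), String.ofList (seq.toList ++ List.replicate n ch),
       bad || decide (∃ j : Nat, j < n ∧ pMove.set c (pMove.getD c 0 + (j : Int)) = pAvoid)) := by
  induction n with
  | zero =>
    intro pMove pAvoid c ch seq bad hc
    rw [Nat.cast_zero, add_zero, pv_set_self pMove c hc]
    simp [pvA_up]
  | succ n ih =>
    intro pMove pAvoid c ch seq bad hc
    have hc' : c < (pMove.set c (pMove.getD c 0 + 1)).length := by simpa using hc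
    have hget : (pMove.set c (pMove.getD c 0 + 1)).getD c 0 = pMove.getD c 0 + 1 :=
      pv_getD_set_self _ _ _ hc
    have harith : pMove.getD c 0 + ((n+1 : Nat) : Int)
        = (pMove.set c (pMove.getD c 0 + 1)).getD c 0 + (n : Int) := by
      rw [hget]; push_cast; ring
    have hcond : pMove.getD c 0 < pMove.getD c 0 + ((n+1 : Nat) : Int) := by push_cast; omega
    rw [show pvA_up (n+1) pMove pAvoid (pMove.getD c 0 + ((n+1 : Nat) : Int)) c ch seq bad
        = pvA_up n (pMove.set c (pMove.getD c 0 + 1)) pAvoid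
            (pMove.getD c 0 + ((n+1 : Nat) : Int)) c ch (seq.push ch)
            (if pMove == pAvoid then true else bad) from by
      simp only [pvA_up]
      try rw [if_pos hcond]]
    rw [harith, ih _ pAvoid c ch _ _ hc']
    simp only [Prod.mk.injEq]
    refine ⟨?_, ?_, ?_⟩
    · have harith2 : pMove.getD c 0 + 1 + (n : Int) = pMove.getD c 0 + ((n+1 : Nat) : Int) := by
        push_cast; ring
      rw [List.set_set, hget, harith2]
    · congr 1
      simp [List.replicate_succ]
    · rw [hget]
      have hif : (if pMove == pAvoid then true else bad)
          = (decide (pMove = pAvoid) || bad) := by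
        by_cases h : pMove = pAvoid <;> simp [h]
      rw [hif]
      have hiff : ((pMove = pAvoid) ∨
          (∃ j : Nat, j < n ∧ (pMove.set c (pMove.getD c 0 + 1)).set c (pMove.getD c 0 + 1 + (j : Int)) = pAvoid))
          ↔ (∃ j : Nat, j < n + 1 ∧ pMove.set c (pMove.getD c 0 + (j : Int)) = pAvoid) := by
        constructor
        · rintro (h | ⟨j, hj, h⟩)
          · exact ⟨0, by omega, by
              rw [Nat.cast_zero, add_zero, pv_set_self pMove c hc]; exact h⟩
          · refine ⟨j + 1, by omega, ?_⟩
            rw [List.set_set] at h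
            have : pMove.getD c 0 + ((j + 1 : Nat) : Int) = pMove.getD c 0 + 1 + (j : Int) := by
              push_cast; ring
            rw [this]; exact h
        · rintro ⟨j, hj, h⟩
          cases j with
          | zero =>
            left
            rw [Nat.cast_zero, add_zero, pv_set_self pMove c hc] at h; exact h
          | succ j =>
            right
            refine ⟨j, by omega, ?_⟩
            rw [List.set_set]
            have : pMove.getD c 0 + 1 + (j : Int) = pMove.getD c 0 + ((j + 1 : Nat) : Int) := by
              push_cast; ring
            rw [this]; exact h
      have key : (decide (pMove = pAvoid)
            || decide (∃ j : Nat, j < n ∧ (pMove.set c (pMove.getD c 0 + 1)).set c (pMove.getD c 0 + 1 + (j : Int)) = pAvoid))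
          = decide (∃ j : Nat, j < n + 1 ∧ pMove.set c (pMove.getD c 0 + (j : Int)) = pAvoid) := by
        rw [Bool.eq_iff_iff]
        simp only [Bool.or_eq_true, decide_eq_true_eq]
        exact hiff
      rw [← key]
      cases bad <;> cases h1 : decide (pMove = pAvoid) <;>
        cases h2 : decide (∃ j : Nat, j < n ∧ (pMove.set c (pMove.getD c 0 + 1)).set c (pMove.getD c 0 + 1 + (j : Int)) = pAvoid) <;> rfl

theorem pvA_down_spec (n : Nat) : ∀ (pMove pAvoid : List Int) (c : Nat) (ch : Char)
    (seq : String) (bad : Bool), c < pMove.length →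
    pvA_down n pMove pAvoid (pMove.getD c 0 - n) c ch seq bad =
      (pMove.set c (pMove.getD c 0 - n), String.ofList (seq.toList ++ List.replicate n ch),
       bad || decide (∃ j : Nat, j < n ∧ pMove.set c (pMove.getD c 0 - (j : Int)) = pAvoid)) := by
  induction n with
  | zero =>
    intro pMove pAvoid c ch seq bad hc
    rw [Nat.cast_zero, sub_zero, pv_set_self pMove c hc]
    simp [pvA_down]
  | succ n ih =>
    intro pMove pAvoid c ch seq bad hc
    have hc' : c < (pMove.set c (pMove.getD c 0 - 1)).length := by simpa using hc
    have hget : (pMove.set c (pMove.getD c 0 - 1)).getD c 0 = pMove.getD c 0 - 1 :=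
      pv_getD_set_self _ _ _ hc
    have harith : pMove.getD c 0 - ((n+1 : Nat) : Int)
        = (pMove.set c (pMove.getD c 0 - 1)).getD c 0 - (n : Int) := by
      rw [hget]; push_cast; ring
    have hcond : pMove.getD c 0 - ((n+1 : Nat) : Int) < pMove.getD c 0 := by push_cast; omega
    rw [show pvA_down (n+1) pMove pAvoid (pMove.getD c 0 - ((n+1 : Nat) : Int)) c ch seq bad
        = pvA_down n (pMove.set c (pMove.getD c 0 - 1)) pAvoid
            (pMove.getD c 0 - ((n+1 : Nat) : Int)) c ch (seq.push ch)
            (if pMove == pAvoid then true else bad) from by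
      simp only [pvA_down]
      try rw [if_pos hcond]]
    rw [harith, ih _ pAvoid c ch _ _ hc']
    simp only [Prod.mk.injEq]
    refine ⟨?_, ?_, ?_⟩
    · have harith2 : pMove.getD c 0 - 1 - (n : Int) = pMove.getD c 0 - ((n+1 : Nat) : Int) := by
        push_cast; ring
      rw [List.set_set, hget, harith2]
    · congr 1
      simp [List.replicate_succ]
    · rw [hget]
      have hif : (if pMove == pAvoid then true else bad)
          = (decide (pMove = pAvoid) || bad) := by
        by_cases h : pMove = pAvoid <;> simp [h]
      rw [hif]
      have hiff : ((pMove = pAvoid) ∨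
          (∃ j : Nat, j < n ∧ (pMove.set c (pMove.getD c 0 - 1)).set c (pMove.getD c 0 - 1 - (j : Int)) = pAvoid))
          ↔ (∃ j : Nat, j < n + 1 ∧ pMove.set c (pMove.getD c 0 - (j : Int)) = pAvoid) := by
        constructor
        · rintro (h | ⟨j, hj, h⟩)
          · exact ⟨0, by omega, by
              rw [Nat.cast_zero, sub_zero, pv_set_self pMove c hc]; exact h⟩
          · refine ⟨j + 1, by omega, ?_⟩
            rw [List.set_set] at h
            have : pMove.getD c 0 - ((j + 1 : Nat) : Int) = pMove.getD c 0 - 1 - (j : Int) := by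
              push_cast; ring
            rw [this]; exact h
        · rintro ⟨j, hj, h⟩
          cases j with
          | zero =>
            left
            rw [Nat.cast_zero, sub_zero, pv_set_self pMove c hc] at h; exact h
          | succ j =>
            right
            refine ⟨j, by omega, ?_⟩
            rw [List.set_set]
            have : pMove.getD c 0 - 1 - (j : Int) = pMove.getD c 0 - ((j + 1 : Nat) : Int) := by
              push_cast; ring
            rw [this]; exact h
      have key : (decide (pMove = pAvoid)
            || decide (∃ j : Nat, j < n ∧ (pMove.set c (pMove.getD c 0 - 1)).set c (pMove.getD c 0 - 1 - (j : Int)) = pAvoid))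
          = decide (∃ j : Nat, j < n + 1 ∧ pMove.set c (pMove.getD c 0 - (j : Int)) = pAvoid) := by
        rw [Bool.eq_iff_iff]
        simp only [Bool.or_eq_true, decide_eq_true_eq]
        exact hiff
      rw [← key]
      cases bad <;> cases h1 : decide (pMove = pAvoid) <;>
        cases h2 : decide (∃ j : Nat, j < n ∧ (pMove.set c (pMove.getD c 0 - 1)).set c (pMove.getD c 0 - 1 - (j : Int)) = pAvoid) <;> rfl

theorem pvA_axis_spec (pMove pAvoid : List Int) (c : Nat) (e : Int) (chU chD : Char)
    (seq : String) (bad : Bool) (hc : c < pMove.length) :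
    (let r1 := pvA_up ((e - pMove.getD c 0).toNat) pMove pAvoid e c chU seq bad
     pvA_down ((r1.1.getD c 0 - e).toNat) r1.1 pAvoid e c chD r1.2.1 r1.2.2) =
      (pMove.set c e, String.ofList (seq.toList ++ pvSegStr (pMove.getD c 0) e chU chD),
       bad || pvHitAx (pMove.getD c 0) e (fun v => pMove.set c v) pAvoid) := by
  by_cases hle : pMove.getD c 0 ≤ e
  · have he : e = pMove.getD c 0 + ((e - pMove.getD c 0).toNat : Int) := by omega
    have hup := pvA_up_spec ((e - pMove.getD c 0).toNat) pMove pAvoid c chU seq bad hc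
    rw [← he] at hup
    simp only [hup]
    have hg : (pMove.set c e).getD c 0 = e := pv_getD_set_self _ _ _ hc
    have hdz : ((pMove.set c e).getD c 0 - e).toNat = 0 := by rw [hg]; omega
    rw [hdz]
    simp only [pvA_down]
    have hseg : pvSegStr (pMove.getD c 0) e chU chD = List.replicate (e - pMove.getD c 0).toNat chU := by
      unfold pvSegStr; rw [if_pos (by omega)]
    have hax : pvHitAx (pMove.getD c 0) e (fun v => pMove.set c v) pAvoid
        = decide (∃ j : Nat, j < (e - pMove.getD c 0).toNat ∧ pMove.set c (pMove.getD c 0 + (j : Int)) = pAvoid) := by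
      unfold pvHitAx
      have h0 : (pMove.getD c 0 - e).toNat = 0 := by omega
      simp only [h0]
      simp
    rw [hseg, hax]
  · have hdz : (e - pMove.getD c 0).toNat = 0 := by omega
    rw [hdz]
    simp only [pvA_up]
    have hdn := pvA_down_spec ((pMove.getD c 0 - e).toNat) pMove pAvoid c chD seq bad hc
    have he : pMove.getD c 0 - ((pMove.getD c 0 - e).toNat : Int) = e := by omega
    rw [he] at hdn
    simp only [hdn]
    have hseg : pvSegStr (pMove.getD c 0) e chU chD = List.replicate (pMove.getD c 0 - e).toNat chD := by
      unfold pvSegStr; rw [if_neg (by omega)]; congr 1; omega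
    have hax : pvHitAx (pMove.getD c 0) e (fun v => pMove.set c v) pAvoid
        = decide (∃ j : Nat, j < (pMove.getD c 0 - e).toNat ∧ pMove.set c (pMove.getD c 0 - (j : Int)) = pAvoid) := by
      unfold pvHitAx
      have h0 : (e - pMove.getD c 0).toNat = 0 := by omega
      simp only [h0]
      simp
    rw [hseg, hax]

theorem pvA_pass_spec (b0 b1 e0 e1 : Int) (bt et pAvoid : List Int) (xf : Bool) (bad0 : Bool) :
    pvA_pass (b0::b1::bt) (e0::e1::et) pAvoid xf bad0 =
      (if xf then String.ofList (pvSegStr b0 e0 '>' '<' ++ pvSegStr b1 e1 '^' 'v')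
       else String.ofList (pvSegStr b1 e1 '^' 'v' ++ pvSegStr b0 e0 '>' '<'),
       if xf then
         bad0 || pvHitAx b0 e0 (fun v => v::b1::bt) pAvoid || pvHitAx b1 e1 (fun v => e0::v::bt) pAvoid
       else
         bad0 || pvHitAx b1 e1 (fun v => b0::v::bt) pAvoid || pvHitAx b0 e0 (fun v => v::e1::bt) pAvoid) := by
  cases xf with
  | true =>
    unfold pvA_pass
    rw [show List.range 2 = [0, 1] from rfl]
    simp only [List.foldl]
    rw [show pvA_axis (e0::e1::et) pAvoid true ((b0::b1::bt), "", bad0) 0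
        = (let r1 := pvA_up ((e0 - (b0::b1::bt).getD 0 0).toNat) (b0::b1::bt) pAvoid e0 0 '>' "" bad0
           pvA_down ((r1.1.getD 0 0 - e0).toNat) r1.1 pAvoid e0 0 '<' r1.2.1 r1.2.2) from rfl]
    rw [pvA_axis_spec (b0::b1::bt) pAvoid 0 e0 '>' '<' "" bad0 (by simp)]
    rw [show ((b0::b1::bt).set 0 e0 : List Int) = e0::b1::bt from rfl]
    rw [show ((b0::b1::bt).getD 0 0 : Int) = b0 from rfl]
    rw [show ∀ (s : String) (b : Bool), pvA_axis (e0::e1::et) pAvoid true ((e0::b1::bt), s, b) 1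
        = (let r1 := pvA_up ((e1 - (e0::b1::bt).getD 1 0).toNat) (e0::b1::bt) pAvoid e1 1 '^' s b
           pvA_down ((r1.1.getD 1 0 - e1).toNat) r1.1 pAvoid e1 1 'v' r1.2.1 r1.2.2) from fun s b => rfl]
    rw [pvA_axis_spec (e0::b1::bt) pAvoid 1 e1 '^' 'v' _ _ (by simp)]
    rw [show ((e0::b1::bt).getD 1 0 : Int) = b1 from rfl]
    simp [List.set]
  | false =>
    unfold pvA_pass
    rw [show List.range 2 = [0, 1] from rfl]
    simp only [List.foldl]
    rw [show pvA_axis (e0::e1::et) pAvoid false ((b0::b1::bt), "", bad0) 0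
        = (let r1 := pvA_up ((e1 - (b0::b1::bt).getD 1 0).toNat) (b0::b1::bt) pAvoid e1 1 '^' "" bad0
           pvA_down ((r1.1.getD 1 0 - e1).toNat) r1.1 pAvoid e1 1 'v' r1.2.1 r1.2.2) from rfl]
    rw [pvA_axis_spec (b0::b1::bt) pAvoid 1 e1 '^' 'v' "" bad0 (by simp)]
    rw [show ((b0::b1::bt).set 1 e1 : List Int) = b0::e1::bt from rfl]
    rw [show ((b0::b1::bt).getD 1 0 : Int) = b1 from rfl]
    rw [show ∀ (s : String) (b : Bool), pvA_axis (e0::e1::et) pAvoid false ((b0::e1::bt), s, b) 1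
        = (let r1 := pvA_up ((e0 - (b0::e1::bt).getD 0 0).toNat) (b0::e1::bt) pAvoid e0 0 '>' s b
           pvA_down ((r1.1.getD 0 0 - e0).toNat) r1.1 pAvoid e0 0 '<' r1.2.1 r1.2.2) from fun s b => rfl]
    rw [pvA_axis_spec (b0::e1::bt) pAvoid 0 e0 '>' '<' _ _ (by simp)]
    rw [show ((b0::e1::bt).getD 0 0 : Int) = b0 from rfl]
    simp [List.set]

theorem pvHitAx_iff (m e : Int) (f : Int → List Int) (pAvoid : List Int) :
    pvHitAx m e f pAvoid = true ↔ ∃ v : Int, pvBtw m e v ∧ f v = pAvoid := by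
  unfold pvHitAx pvBtw
  simp only [Bool.or_eq_true, decide_eq_true_eq]
  constructor
  · rintro (⟨j, hj, h⟩ | ⟨j, hj, h⟩)
    · exact ⟨m + j, Or.inl ⟨by omega, by omega⟩, h⟩
    · exact ⟨m - j, Or.inr ⟨by omega, by omega⟩, h⟩
  · rintro ⟨v, (⟨h1, h2⟩ | ⟨h1, h2⟩), h⟩
    · left
      refine ⟨(v - m).toNat, by omega, ?_⟩
      have : m + ((v - m).toNat : Int) = v := by omega
      rw [this]; exact h
    · right
      refine ⟨(m - v).toNat, by omega, ?_⟩
      have : m - ((m - v).toNat : Int) = v := by omega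
      rw [this]; exact h


theorem pvHit1 (b0 b1 e0 e1 a0 a1 : Int) (bt at_ : List Int) :
    pvHitAx b0 e0 (fun v => v::b1::bt) (a0::a1::at_) = true ↔ (pvBtw b0 e0 a0 ∧ b1 = a1 ∧ bt = at_) := by
  rw [pvHitAx_iff]
  constructor
  · rintro ⟨v, hv, he⟩
    simp only [List.cons.injEq] at he
    exact ⟨he.1 ▸ hv, he.2.1, he.2.2⟩
  · rintro ⟨hv, h1, h2⟩
    exact ⟨a0, hv, by simp [h1, h2]⟩

theorem pvHit2 (b0 b1 e0 e1 a0 a1 : Int) (bt at_ : List Int) :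
    pvHitAx b1 e1 (fun v => e0::v::bt) (a0::a1::at_) = true ↔ (e0 = a0 ∧ pvBtw b1 e1 a1 ∧ bt = at_) := by
  rw [pvHitAx_iff]
  constructor
  · rintro ⟨v, hv, he⟩
    simp only [List.cons.injEq] at he
    exact ⟨he.1, he.2.1 ▸ hv, he.2.2⟩
  · rintro ⟨h1, hv, h2⟩
    exact ⟨a1, hv, by simp [h1, h2]⟩

theorem pvHit3 (b0 b1 e0 e1 a0 a1 : Int) (bt at_ : List Int) :
    pvHitAx b1 e1 (fun v => b0::v::bt) (a0::a1::at_) = true ↔ (b0 = a0 ∧ pvBtw b1 e1 a1 ∧ bt = at_) := by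
  rw [pvHitAx_iff]
  constructor
  · rintro ⟨v, hv, he⟩
    simp only [List.cons.injEq] at he
    exact ⟨he.1, he.2.1 ▸ hv, he.2.2⟩
  · rintro ⟨h1, hv, h2⟩
    exact ⟨a1, hv, by simp [h1, h2]⟩

theorem pvHit4 (b0 b1 e0 e1 a0 a1 : Int) (bt at_ : List Int) :
    pvHitAx b0 e0 (fun v => v::e1::bt) (a0::a1::at_) = true ↔ (pvBtw b0 e0 a0 ∧ e1 = a1 ∧ bt = at_) := by
  rw [pvHitAx_iff]
  constructor
  · rintro ⟨v, hv, he⟩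
    simp only [List.cons.injEq] at he
    exact ⟨he.1 ▸ hv, he.2.1, he.2.2⟩
  · rintro ⟨hv, h1, h2⟩
    exact ⟨a0, hv, by simp [h1, h2]⟩

theorem onPathT_iff (b0 b1 e0 e1 a0 a1 : Int) :
    pvB_onPath b0 b1 e0 e1 a0 a1 true = true ↔ pvOnPath b0 b1 e0 e1 a0 a1 := by
  simp [pvB_onPath, pvOnPath]

theorem onPathF_iff (b0 b1 e0 e1 a0 a1 : Int) :
    pvB_onPath b0 b1 e0 e1 a0 a1 false = true ↔ pvOnPath b1 b0 e1 e0 a1 a0 := by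
  simp [pvB_onPath, pvOnPath]

theorem badT_iff (b0 b1 e0 e1 a0 a1 : Int) (bt et at_ : List Int) :
    (((e0::e1::et : List Int) == (a0::a1::at_)) ||
      (pvHitAx b0 e0 (fun v => v::b1::bt) (a0::a1::at_) || pvHitAx b1 e1 (fun v => e0::v::bt) (a0::a1::at_))) = true
    ↔ ((e0::e1::et : List Int) = (a0::a1::at_) ∨ (bt = at_ ∧ pvExclT b0 b1 e0 e1 a0 a1)) := by
  simp only [Bool.or_eq_true, beq_iff_eq]
  rw [pvHit1 b0 b1 e0 e1 a0 a1 bt at_, pvHit2 b0 b1 e0 e1 a0 a1 bt at_]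
  unfold pvExclT
  tauto

theorem badF_iff (b0 b1 e0 e1 a0 a1 : Int) (bt et at_ : List Int) :
    (((e0::e1::et : List Int) == (a0::a1::at_)) ||
      (pvHitAx b1 e1 (fun v => b0::v::bt) (a0::a1::at_) || pvHitAx b0 e0 (fun v => v::e1::bt) (a0::a1::at_))) = true
    ↔ ((e0::e1::et : List Int) = (a0::a1::at_) ∨ (bt = at_ ∧ pvExclF b0 b1 e0 e1 a0 a1)) := by
  simp only [Bool.or_eq_true, beq_iff_eq]
  rw [pvHit3 b0 b1 e0 e1 a0 a1 bt at_, pvHit4 b0 b1 e0 e1 a0 a1 bt at_]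
  unfold pvExclF
  tauto

theorem inclT_of_full (b0 b1 e0 e1 a0 a1 : Int) (bt et at_ : List Int)
    (h : (e0::e1::et : List Int) = (a0::a1::at_) ∨ (bt = at_ ∧ pvExclT b0 b1 e0 e1 a0 a1)) :
    pvOnPath b0 b1 e0 e1 a0 a1 := by
  rcases h with h | ⟨-, h⟩
  · simp only [List.cons.injEq] at h
    unfold pvOnPath
    right
    exact ⟨h.1.symm, by omega, by omega⟩
  · unfold pvExclT pvBtw at h
    unfold pvOnPath
    omega

theorem inclF_of_full (b0 b1 e0 e1 a0 a1 : Int) (bt et at_ : List Int)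
    (h : (e0::e1::et : List Int) = (a0::a1::at_) ∨ (bt = at_ ∧ pvExclF b0 b1 e0 e1 a0 a1)) :
    pvOnPath b1 b0 e1 e0 a1 a0 := by
  rcases h with h | ⟨-, h⟩
  · simp only [List.cons.injEq] at h
    unfold pvOnPath
    right
    exact ⟨h.2.1.symm, by omega, by omega⟩
  · unfold pvExclF pvBtw at h
    unfold pvOnPath
    omega

theorem exclT_of_onpath (b0 b1 e0 e1 a0 a1 : Int) (h : pvOnPath b0 b1 e0 e1 a0 a1)
    (h0 : b0 ≠ e0) (h1 : b1 ≠ e1) (hc : ¬(a0 = e0 ∧ a1 = e1)) :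
    pvExclT b0 b1 e0 e1 a0 a1 := by
  unfold pvOnPath at h
  unfold pvExclT pvBtw
  omega

theorem exclF_of_onpath (b0 b1 e0 e1 a0 a1 : Int) (h : pvOnPath b1 b0 e1 e0 a1 a0)
    (h0 : b0 ≠ e0) (h1 : b1 ≠ e1) (hc : ¬(a0 = e0 ∧ a1 = e1)) :
    pvExclF b0 b1 e0 e1 a0 a1 := by
  unfold pvOnPath at h
  unfold pvExclF pvBtw
  omega

theorem exclT_corner_false (b0 b1 e0 e1 a0 a1 : Int) (hc : a0 = e0 ∧ a1 = e1) :
    ¬ pvExclT b0 b1 e0 e1 a0 a1 := by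
  unfold pvExclT pvBtw
  omega

theorem exclF_corner_false (b0 b1 e0 e1 a0 a1 : Int) (hc : a0 = e0 ∧ a1 = e1) :
    ¬ pvExclF b0 b1 e0 e1 a0 a1 := by
  unfold pvExclF pvBtw
  omega

theorem pvSegX (b0 e0 : Int) :
    (if b0 ≤ e0 then String.ofList (List.replicate (e0 - b0).toNat '>')
     else String.ofList (List.replicate (b0 - e0).toNat '<'))
    = String.ofList (pvSegStr b0 e0 '>' '<') := by
  unfold pvSegStr
  rw [apply_ite String.ofList]
  by_cases h : b0 ≤ e0
  · rw [if_pos h, if_pos (by omega)]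
  · rw [if_neg h, if_neg (by omega)]
    congr 2
    omega

theorem pvSegY (b1 e1 : Int) :
    (if b1 ≤ e1 then String.ofList (List.replicate (e1 - b1).toNat '^')
     else String.ofList (List.replicate (b1 - e1).toNat 'v'))
    = String.ofList (pvSegStr b1 e1 '^' 'v') := by
  unfold pvSegStr
  rw [apply_ite String.ofList]
  by_cases h : b1 ≤ e1
  · rw [if_pos h, if_pos (by omega)]
  · rw [if_neg h, if_neg (by omega)]
    congr 2
    omega

theorem seg_comm (b0 e0 b1 e1 : Int) (h : b0 = e0 ∨ b1 = e1) :
    String.ofList (pvSegStr b0 e0 '>' '<' ++ pvSegStr b1 e1 '^' 'v')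
    = String.ofList (pvSegStr b1 e1 '^' 'v' ++ pvSegStr b0 e0 '>' '<') := by
  rcases h with h | h
  · have hseg : pvSegStr b0 e0 '>' '<' = [] := by
      unfold pvSegStr
      rw [if_pos (by omega)]
      have : (e0 - b0).toNat = 0 := by omega
      rw [this, List.replicate_zero]
    rw [hseg, List.nil_append, List.append_nil]
  · have hseg : pvSegStr b1 e1 '^' 'v' = [] := by
      unfold pvSegStr
      rw [if_pos (by omega)]
      have : (e1 - b1).toNat = 0 := by omega
      rw [this, List.replicate_zero]
    rw [hseg, List.nil_append, List.append_nil]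

theorem seg_head (m e : Int) (u d : Char) (h : m ≠ e) :
    ∃ t, pvSegStr m e u d = u :: t ∨ pvSegStr m e u d = d :: t := by
  unfold pvSegStr
  by_cases h0 : 0 ≤ e - m
  · obtain ⟨n, hn⟩ : ∃ n, (e - m).toNat = n + 1 := ⟨(e - m).toNat - 1, by omega⟩
    rw [if_pos h0, hn, List.replicate_succ]
    exact ⟨_, Or.inl rfl⟩
  · obtain ⟨n, hn⟩ : ∃ n, (-(e - m)).toNat = n + 1 := ⟨(-(e - m)).toNat - 1, by omega⟩
    rw [if_neg h0, hn, List.replicate_succ]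
    exact ⟨_, Or.inr rfl⟩

theorem pv_toList_ofList (l : List Char) : (String.ofList l).toList = l := by simp

theorem seg_ne (b0 e0 b1 e1 : Int) (h0 : b0 ≠ e0) (h1 : b1 ≠ e1) :
    String.ofList (pvSegStr b0 e0 '>' '<' ++ pvSegStr b1 e1 '^' 'v')
    ≠ String.ofList (pvSegStr b1 e1 '^' 'v' ++ pvSegStr b0 e0 '>' '<') := by
  obtain ⟨tx, hx⟩ := seg_head b0 e0 '>' '<' h0
  obtain ⟨ty, hy⟩ := seg_head b1 e1 '^' 'v' h1
  intro hEq
  have hL := congrArg String.toList hEq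
  rw [pv_toList_ofList, pv_toList_ofList] at hL
  rcases hx with hx | hx <;> rcases hy with hy | hy <;>
    rw [hx, hy] at hL <;> simp_all

-- ===== VERDICT (by name: the statements are the Claim_ definitions above) =====
theorem buildSeqFromTo_spec : Claim_unchanged_buildSeqFromTo := by
  intro pBegin pEnd xFirst pAvoid _ hpre
  obtain ⟨hl1, hl2, hl3⟩ := hpre
  rcases pBegin with _ | ⟨b0, pB⟩
  · simp at hl1
  rcases pB with _ | ⟨b1, bt⟩
  · simp at hl1
  rcases pEnd with _ | ⟨e0, pE⟩
  · simp at hl2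
  rcases pE with _ | ⟨e1, et⟩
  · simp at hl2
  rcases pAvoid with _ | ⟨a0, pA⟩
  · simp at hl3
  rcases pA with _ | ⟨a1, at_⟩
  · simp at hl3
  intro hnd
  show buildSeqFromTo _ _ _ _ = buildSeqFromTo_alt _ _ _ _
  cases xFirst with
  | true =>
    by_cases hI : pvOnPath b0 b1 e0 e1 a0 a1
    · have hOn : pvB_onPath b0 b1 e0 e1 a0 a1 true = true := (onPathT_iff b0 b1 e0 e1 a0 a1).mpr hI
      by_cases hf : ((e0::e1::et : List Int) = (a0::a1::at_)) ∨ (bt = at_ ∧ pvExclT b0 b1 e0 e1 a0 a1)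
      · have hbad := (badT_iff b0 b1 e0 e1 a0 a1 bt et at_).mpr hf
        simp only [buildSeqFromTo, buildSeqFromTo_alt, pvA_pass_spec, Bool.not_true,
          List.getD_cons_zero, List.getD_cons_succ, pvSegX, pvSegY, Bool.or_assoc]
        rw [hbad, hOn]
        simp
      · have hbad : (((e0::e1::et : List Int) == (a0::a1::at_)) ||
            (pvHitAx b0 e0 (fun v => v::b1::bt) (a0::a1::at_) || pvHitAx b1 e1 (fun v => e0::v::bt) (a0::a1::at_))) = false := by
          rw [Bool.eq_false_iff]
          intro h
          exact hf ((badT_iff b0 b1 e0 e1 a0 a1 bt et at_).mp h)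
        have hne : (e0::e1::et : List Int) ≠ (a0::a1::at_) := fun h => hf (Or.inl h)
        have hnx : ¬(bt = at_ ∧ pvExclT b0 b1 e0 e1 a0 a1) := fun h => hf (Or.inr h)
        have hdeg : b0 = e0 ∨ b1 = e1 := by
          by_contra hc
          push_neg at hc
          apply hnd
          unfold D_buildSeqFromTo
          refine ⟨⟨Or.inl ⟨rfl, hI⟩, hc.1, hc.2⟩, hne, ?_⟩
          by_cases hdrop : (at_ : List Int) = bt
          · right
            by_contra hcorner
            refine hnx ⟨hdrop.symm, exclT_of_onpath b0 b1 e0 e1 a0 a1 hI hc.1 hc.2 ?_⟩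
            rintro ⟨h1', h2'⟩
            exact hcorner (by rw [show (a0 : Int) = e0 from h1', show (a1 : Int) = e1 from h2']; simp)
          · left
            exact hdrop
        simp only [buildSeqFromTo, buildSeqFromTo_alt, pvA_pass_spec, Bool.not_true,
          List.getD_cons_zero, List.getD_cons_succ, pvSegX, pvSegY, Bool.or_assoc]
        rw [hbad, hOn, seg_comm b0 e0 b1 e1 hdeg]
        simp
    · have hOn : pvB_onPath b0 b1 e0 e1 a0 a1 true = false := by
        rw [Bool.eq_false_iff]
        intro h
        exact hI ((onPathT_iff b0 b1 e0 e1 a0 a1).mp h)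
      have hbad : (((e0::e1::et : List Int) == (a0::a1::at_)) ||
          (pvHitAx b0 e0 (fun v => v::b1::bt) (a0::a1::at_) || pvHitAx b1 e1 (fun v => e0::v::bt) (a0::a1::at_))) = false := by
        rw [Bool.eq_false_iff]
        intro h
        exact hI (inclT_of_full b0 b1 e0 e1 a0 a1 bt et at_ ((badT_iff b0 b1 e0 e1 a0 a1 bt et at_).mp h))
      simp only [buildSeqFromTo, buildSeqFromTo_alt, pvA_pass_spec, Bool.not_true,
        List.getD_cons_zero, List.getD_cons_succ, pvSegX, pvSegY, Bool.or_assoc]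
      rw [hbad, hOn]
      simp
  | false =>
    by_cases hI : pvOnPath b1 b0 e1 e0 a1 a0
    · have hOn : pvB_onPath b0 b1 e0 e1 a0 a1 false = true := (onPathF_iff b0 b1 e0 e1 a0 a1).mpr hI
      by_cases hf : ((e0::e1::et : List Int) = (a0::a1::at_)) ∨ (bt = at_ ∧ pvExclF b0 b1 e0 e1 a0 a1)
      · have hbad := (badF_iff b0 b1 e0 e1 a0 a1 bt et at_).mpr hf
        simp only [buildSeqFromTo, buildSeqFromTo_alt, pvA_pass_spec, Bool.not_false,
          List.getD_cons_zero, List.getD_cons_succ, pvSegX, pvSegY, Bool.or_assoc]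
        rw [hbad, hOn]
        simp
      · have hbad : (((e0::e1::et : List Int) == (a0::a1::at_)) ||
            (pvHitAx b1 e1 (fun v => b0::v::bt) (a0::a1::at_) || pvHitAx b0 e0 (fun v => v::e1::bt) (a0::a1::at_))) = false := by
          rw [Bool.eq_false_iff]
          intro h
          exact hf ((badF_iff b0 b1 e0 e1 a0 a1 bt et at_).mp h)
        have hne : (e0::e1::et : List Int) ≠ (a0::a1::at_) := fun h => hf (Or.inl h)
        have hnx : ¬(bt = at_ ∧ pvExclF b0 b1 e0 e1 a0 a1) := fun h => hf (Or.inr h)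
        have hdeg : b0 = e0 ∨ b1 = e1 := by
          by_contra hc
          push_neg at hc
          apply hnd
          unfold D_buildSeqFromTo
          refine ⟨⟨Or.inr ⟨rfl, hI⟩, hc.1, hc.2⟩, hne, ?_⟩
          by_cases hdrop : (at_ : List Int) = bt
          · right
            by_contra hcorner
            refine hnx ⟨hdrop.symm, exclF_of_onpath b0 b1 e0 e1 a0 a1 hI hc.1 hc.2 ?_⟩
            rintro ⟨h1', h2'⟩
            exact hcorner (by rw [show (a0 : Int) = e0 from h1', show (a1 : Int) = e1 from h2']; simp)
          · left
            exact hdrop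
        simp only [buildSeqFromTo, buildSeqFromTo_alt, pvA_pass_spec, Bool.not_false,
          List.getD_cons_zero, List.getD_cons_succ, pvSegX, pvSegY, Bool.or_assoc]
        rw [hbad, hOn, ← seg_comm b0 e0 b1 e1 hdeg]
        simp
    · have hOn : pvB_onPath b0 b1 e0 e1 a0 a1 false = false := by
        rw [Bool.eq_false_iff]
        intro h
        exact hI ((onPathF_iff b0 b1 e0 e1 a0 a1).mp h)
      have hbad : (((e0::e1::et : List Int) == (a0::a1::at_)) ||
          (pvHitAx b1 e1 (fun v => b0::v::bt) (a0::a1::at_) || pvHitAx b0 e0 (fun v => v::e1::bt) (a0::a1::at_))) = false := by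
        rw [Bool.eq_false_iff]
        intro h
        exact hI (inclF_of_full b0 b1 e0 e1 a0 a1 bt et at_ ((badF_iff b0 b1 e0 e1 a0 a1 bt et at_).mp h))
      simp only [buildSeqFromTo, buildSeqFromTo_alt, pvA_pass_spec, Bool.not_false,
        List.getD_cons_zero, List.getD_cons_succ, pvSegX, pvSegY, Bool.or_assoc]
      rw [hbad, hOn]
      simp

theorem buildSeqFromTo_changed : Claim_changed_buildSeqFromTo := by
  unfold Claim_changed_buildSeqFromTo
  decide

theorem buildSeqFromTo_tight : Claim_exact_buildSeqFromTo := by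
  intro pBegin pEnd xFirst pAvoid _ hpre hd
  obtain ⟨hl1, hl2, hl3⟩ := hpre
  rcases pBegin with _ | ⟨b0, pB⟩
  · simp at hl1
  rcases pB with _ | ⟨b1, bt⟩
  · simp at hl1
  rcases pEnd with _ | ⟨e0, pE⟩
  · simp at hl2
  rcases pE with _ | ⟨e1, et⟩
  · simp at hl2
  rcases pAvoid with _ | ⟨a0, pA⟩
  · simp at hl3
  rcases pA with _ | ⟨a1, at_⟩
  · simp at hl3
  unfold D_buildSeqFromTo pvD at hd
  obtain ⟨⟨hIor, h0, h1⟩, hne, hthird⟩ := hd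
  cases xFirst with
  | true =>
    have hI : pvOnPath b0 b1 e0 e1 a0 a1 := by
      rcases hIor with ⟨-, hI⟩ | ⟨hff, -⟩
      · exact hI
      · exact Bool.noConfusion hff
    have hOn : pvB_onPath b0 b1 e0 e1 a0 a1 true = true := (onPathT_iff b0 b1 e0 e1 a0 a1).mpr hI
    have hbad : (((e0::e1::et : List Int) == (a0::a1::at_)) ||
        (pvHitAx b0 e0 (fun v => v::b1::bt) (a0::a1::at_) || pvHitAx b1 e1 (fun v => e0::v::bt) (a0::a1::at_))) = false := by
      rw [Bool.eq_false_iff]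
      intro h
      rcases (badT_iff b0 b1 e0 e1 a0 a1 bt et at_).mp h with h | ⟨hb, hx⟩
      · exact hne h
      · rcases hthird with hb' | hcorner
        · exact hb' hb.symm
        · simp only [List.take_succ_cons, List.take_zero, List.cons.injEq, and_true] at hcorner
          exact exclT_corner_false b0 b1 e0 e1 a0 a1 hcorner hx
    have happ : String.ofList (pvSegStr b1 e1 '^' 'v') ++ String.ofList (pvSegStr b0 e0 '>' '<')
        = String.ofList (pvSegStr b1 e1 '^' 'v' ++ pvSegStr b0 e0 '>' '<') := by simp
    simp only [buildSeqFromTo, buildSeqFromTo_alt, pvA_pass_spec, Bool.not_true,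
      List.getD_cons_zero, List.getD_cons_succ, pvSegX, pvSegY, Bool.or_assoc]
    rw [hbad, hOn]
    simp only [Bool.not_false, if_true, Bool.not_true, Bool.false_eq_true, if_false]
    rw [happ]
    exact seg_ne b0 e0 b1 e1 h0 h1
  | false =>
    have hI : pvOnPath b1 b0 e1 e0 a1 a0 := by
      rcases hIor with ⟨hff, -⟩ | ⟨-, hI⟩
      · exact Bool.noConfusion hff
      · exact hI
    have hOn : pvB_onPath b0 b1 e0 e1 a0 a1 false = true := (onPathF_iff b0 b1 e0 e1 a0 a1).mpr hI
    have hbad : (((e0::e1::et : List Int) == (a0::a1::at_)) ||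
        (pvHitAx b1 e1 (fun v => b0::v::bt) (a0::a1::at_) || pvHitAx b0 e0 (fun v => v::e1::bt) (a0::a1::at_))) = false := by
      rw [Bool.eq_false_iff]
      intro h
      rcases (badF_iff b0 b1 e0 e1 a0 a1 bt et at_).mp h with h | ⟨hb, hx⟩
      · exact hne h
      · rcases hthird with hb' | hcorner
        · exact hb' hb.symm
        · simp only [List.take_succ_cons, List.take_zero, List.cons.injEq, and_true] at hcorner
          exact exclF_corner_false b0 b1 e0 e1 a0 a1 hcorner hx
    have happ : String.ofList (pvSegStr b0 e0 '>' '<') ++ String.ofList (pvSegStr b1 e1 '^' 'v')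
        = String.ofList (pvSegStr b0 e0 '>' '<' ++ pvSegStr b1 e1 '^' 'v') := by simp
    simp only [buildSeqFromTo, buildSeqFromTo_alt, pvA_pass_spec, Bool.not_false,
      List.getD_cons_zero, List.getD_cons_succ, pvSegX, pvSegY, Bool.or_assoc]
    rw [hbad, hOn]
    simp only [Bool.not_false, if_true, Bool.not_true, Bool.false_eq_true, if_false]
    rw [happ]
    exact (seg_ne b0 e0 b1 e1 h0 h1).symm
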